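-- pv_equiv track=rewrite | github.com/LambertAlpha/garden-of-peony-pavilion | structures/pond_island.py | _edge_blocks
-- ===== SOURCE A (Python) =====
-- def _edge_blocks(mask):
--     """找出 mask 中的边缘方块（至少有一个四邻域不在 mask 中）"""
--     edges = set()
--     for (x, z) in mask:
--         for nx, nz in [(x+1,z),(x-1,z),(x,z+1),(x,z-1)]:
--             if (nx, nz) not in mask:
--                 edges.add((x, z))
--                 break
--     return edges
-- ===== SOURCE B (Python) =====
-- def _edge_blocks(mask):
--     """Edge cells of mask via bulk set operations: interior = mask intersected
--     with the four shifted copies of mask; edges = mask - interior."""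
--     m = set(mask)
--     interior = (m
--                 & {(x + 1, z) for (x, z) in m}
--                 & {(x - 1, z) for (x, z) in m}
--                 & {(x, z + 1) for (x, z) in m}
--                 & {(x, z - 1) for (x, z) in m})
--     return m - interior
-- ===== Notes on version B (the rewrite author's own statement) =====
-- stated objective: idiomatic
-- what changed: Replaces the per-cell neighbor loop with early break by bulk set algebra: intersect the mask with its four shifted copies to get the interior, then return mask minus interior.
import Mathlib
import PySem

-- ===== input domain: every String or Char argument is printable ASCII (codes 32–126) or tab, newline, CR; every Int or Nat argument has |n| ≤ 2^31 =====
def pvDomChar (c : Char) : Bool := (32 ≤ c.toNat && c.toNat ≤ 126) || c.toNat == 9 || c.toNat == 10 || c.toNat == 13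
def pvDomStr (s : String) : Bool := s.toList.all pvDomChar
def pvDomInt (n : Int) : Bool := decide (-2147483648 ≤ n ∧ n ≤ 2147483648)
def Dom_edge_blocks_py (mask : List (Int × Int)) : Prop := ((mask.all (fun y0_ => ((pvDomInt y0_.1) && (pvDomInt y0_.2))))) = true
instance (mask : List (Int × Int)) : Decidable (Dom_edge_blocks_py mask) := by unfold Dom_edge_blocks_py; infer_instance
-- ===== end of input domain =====

-- B replaces A's per-cell neighbor loop (with early break) by bulk set algebra:
-- interior = mask ∩ its four shifted copies, result = mask − interior; same result set.

-- ===== PORT A =====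
-- literal transliteration of A: for (x,z) in mask, add (x,z) to the set `edges`
-- as soon as some 4-neighbor is not in mask (the break = add once iff any is missing)
def edge_blocks_py (mask : List (Int × Int)) : List (Int × Int) :=
  mask.foldl
    (fun (edges : PySem.Set (Int × Int)) p =>
      if [(p.1 + 1, p.2), (p.1 - 1, p.2), (p.1, p.2 + 1), (p.1, p.2 - 1)].any
           (fun q => !(mask.contains q))
      then PySem.Set.add edges p else edges)
    PySem.Set.empty

-- ===== PORT B =====
-- {(x+dx, z+dz) for (x,z) in m}
def pvShift (m : List (Int × Int)) (dx dz : Int) : List (Int × Int) :=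
  PySem.Set.ofList (m.map (fun p => (p.1 + dx, p.2 + dz)))

def edge_blocks_py_alt (mask : List (Int × Int)) : List (Int × Int) :=
  let m := PySem.Set.ofList mask
  let interior :=
    PySem.Set.inter
      (PySem.Set.inter
        (PySem.Set.inter
          (PySem.Set.inter m (pvShift m 1 0))
          (pvShift m (-1) 0))
        (pvShift m 0 1))
      (pvShift m 0 (-1))
  PySem.Set.diff m interior

-- ===== PRECONDITION & SPEC =====
def Spec_edge_blocks_py (mask : List (Int × Int)) (out : List (Int × Int)) : Prop := out = edge_blocks_py_alt mask
instance (mask : List (Int × Int)) (out : List (Int × Int)) : Decidable (Spec_edge_blocks_py mask out) := by unfold Spec_edge_blocks_py; infer_instance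

-- ===== CLAIM (what is proved, stated in full; the proofs are below) =====
def Claim_equal_edge_blocks_py : Prop := ∀ (mask : List (Int × Int)), Dom_edge_blocks_py mask → Spec_edge_blocks_py mask (edge_blocks_py mask)

-- ===== LEMMAS AND PROOFS =====

-- A's per-cell test, as a predicate
def pvPred (mask : List (Int × Int)) (p : Int × Int) : Bool :=
  [(p.1 + 1, p.2), (p.1 - 1, p.2), (p.1, p.2 + 1), (p.1, p.2 - 1)].any
    (fun q => !(mask.contains q))

theorem pv_mem_shift (m : List (Int × Int)) (dx dz : Int) (x : Int × Int) :
    (x ∈ pvShift m dx dz) ↔ ((x.1 - dx, x.2 - dz) ∈ m) := by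
  unfold pvShift
  rw [PySem.Set.mem_ofList, List.mem_map]
  constructor
  · rintro ⟨⟨a, b⟩, hm, h⟩
    have h1 : x.1 = a + dx := by rw [← h]
    have h2 : x.2 = b + dz := by rw [← h]
    have : (x.1 - dx, x.2 - dz) = (a, b) := by
      rw [Prod.ext_iff]; constructor <;> simp [h1, h2]
    rw [this]; exact hm
  · intro h
    refine ⟨(x.1 - dx, x.2 - dz), h, ?_⟩
    rw [Prod.ext_iff]; constructor <;> simp

-- dedup (set(·)) commutes with filter
theorem pv_ofList_filter (p : (Int × Int) → Bool) (xs : List (Int × Int)) :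
    PySem.Set.ofList (xs.filter p) = (PySem.Set.ofList xs).filter p := by
  induction xs with
  | nil => rfl
  | cons x xs ih =>
    by_cases hx : p x = true
    · rw [List.filter_cons_of_pos hx, PySem.Set.ofList_cons, PySem.Set.ofList_cons,
        List.filter_cons_of_pos hx, ih]
      unfold PySem.Set.discard
      rw [List.filter_filter, List.filter_filter]
      congr 1
      apply List.filter_congr
      intro a _
      cases p a <;> simp
    · rw [List.filter_cons_of_neg hx, PySem.Set.ofList_cons, List.filter_cons_of_neg hx, ih]
      unfold PySem.Set.discard
      rw [List.filter_filter]
      apply List.filter_congr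
      intro a _
      by_cases hax : a = x
      · subst hax; simp [hx]
      · simp [hax]

-- A computes set(filter pvPred mask) = filter pvPred (set mask)
theorem pv_A_eq (mask : List (Int × Int)) :
    edge_blocks_py mask = (PySem.Set.ofList mask).filter (pvPred mask) := by
  unfold edge_blocks_py
  have h := PySem.List.foldl_if_eq_foldl_filter (pvPred mask) PySem.Set.add mask
    (PySem.Set.empty : PySem.Set (Int × Int))
  simp only [pvPred] at h
  refine h.trans ?_
  rw [show (PySem.Set.empty : PySem.Set (Int × Int)) = [] from rfl,
    ← PySem.Set.ofList_eq_foldl, pv_ofList_filter]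

-- B computes the same filter of set(mask)
theorem pv_B_eq (mask : List (Int × Int)) :
    edge_blocks_py_alt mask = (PySem.Set.ofList mask).filter (pvPred mask) := by
  unfold edge_blocks_py_alt
  simp only [PySem.Set.inter, PySem.Set.diff]
  rw [List.filter_filter, List.filter_filter, List.filter_filter]
  apply List.filter_congr
  intro x hx
  rw [Bool.eq_iff_iff]
  simp only [pvPred, List.any_cons, List.any_nil, Bool.or_eq_true, Bool.or_false,
    Bool.not_eq_true', PySem.Set.contains, List.contains_eq_mem, List.mem_filter,
    Bool.and_eq_true, decide_eq_true_eq, decide_eq_false_iff_not,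
    pv_mem_shift, PySem.Set.mem_ofList]
  have e1 : (x.1 - 1, x.2 - 0) = (x.1 - 1, x.2) := by simp
  have e2 : (x.1 - -1, x.2 - 0) = (x.1 + 1, x.2) := by
    rw [Prod.ext_iff]; constructor <;> simp
  have e3 : (x.1 - 0, x.2 - 1) = (x.1, x.2 - 1) := by simp
  have e4 : (x.1 - 0, x.2 - -1) = (x.1, x.2 + 1) := by
    rw [Prod.ext_iff]; constructor <;> simp
  rw [e1, e2, e3, e4]
  have hx' : x ∈ mask := (PySem.Set.mem_ofList mask x).mp hx
  tauto

-- ===== VERDICT (by name: the statement is the Claim_ definition above) =====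
theorem edge_blocks_py_spec : Claim_equal_edge_blocks_py := by
  intro mask _
  unfold Spec_edge_blocks_py
  rw [pv_A_eq, pv_B_eq]
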